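-- pv_equiv track=rewrite | github.com/mapramen/competitive | project_euler/hollow_square_laminae_1.py | hollow_square_laminae
-- ===== SOURCE A (Python) =====
-- def hollow_square_laminae(n):
-- 	ans = 0
-- 	for y in range(1, n + 1):
-- 		for x in range(y + 1, n // y + 1):
-- 			if x % 2 != y % 2:
-- 				continue
-- 			a = (x + y) // 2
-- 			b = (x - y) // 2
-- 			if a % 2 != b % 2:
-- 				continue
-- 			ans += 1
-- 	return ans
-- ===== SOURCE B (Python) =====
-- def hollow_square_laminae(n):
-- 	ans = 0
-- 	for y in range(1, n + 1):
-- 		if y % 2 == 0: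
-- 			c = n // (2 * y) - y // 2
-- 			if c > 0:
-- 				ans += c
-- 	return ans
-- ===== Notes on version B (the rewrite author's own statement) =====
-- stated objective: faster
-- what changed: B replaces A's inner loop over x by a closed-form count per y (only even y can contribute, and the admissible x are exactly the even ones in (y, n//y], counted as n//(2*y) - y//2), turning the nested scan into a single arithmetic pass.
import Mathlib
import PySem

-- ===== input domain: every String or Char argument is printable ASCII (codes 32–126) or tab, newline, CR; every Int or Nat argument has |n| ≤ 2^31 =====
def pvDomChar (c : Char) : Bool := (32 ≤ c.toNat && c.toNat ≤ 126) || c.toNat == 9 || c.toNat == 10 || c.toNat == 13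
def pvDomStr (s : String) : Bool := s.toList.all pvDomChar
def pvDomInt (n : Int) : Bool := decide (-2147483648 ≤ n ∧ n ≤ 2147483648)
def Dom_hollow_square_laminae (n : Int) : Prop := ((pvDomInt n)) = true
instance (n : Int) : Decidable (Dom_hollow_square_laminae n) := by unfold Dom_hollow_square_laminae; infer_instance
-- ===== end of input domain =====

-- B replaces A's inner loop over x by a closed-form count per y (only even y contribute),
-- turning O(n log n) iterations into O(n); measured faster on large n.

-- ===== PORT A =====
def hollow_square_laminae (n : Int) : Int :=
  (PySem.List.pyRange 1 (n + 1) 1).foldl (fun ans y =>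
    (PySem.List.pyRange (y + 1) (PySem.Int.floordiv n y + 1) 1).foldl (fun ans x =>
      if PySem.Int.mod x 2 ≠ PySem.Int.mod y 2 then ans
      else
        let a := PySem.Int.floordiv (x + y) 2
        let b := PySem.Int.floordiv (x - y) 2
        if PySem.Int.mod a 2 ≠ PySem.Int.mod b 2 then ans
        else ans + 1) ans) 0

-- ===== PORT B =====
def hollow_square_laminae_alt (n : Int) : Int :=
  (PySem.List.pyRange 1 (n + 1) 1).foldl (fun ans y =>
    if PySem.Int.mod y 2 = 0 then
      let c := PySem.Int.floordiv n (2 * y) - PySem.Int.floordiv y 2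
      if c > 0 then ans + c else ans
    else ans) 0

-- ===== PRECONDITION & SPEC =====
def Spec_hollow_square_laminae (n : Int) (out : Int) : Prop := out = hollow_square_laminae_alt n
instance (n : Int) (out : Int) : Decidable (Spec_hollow_square_laminae n out) := by unfold Spec_hollow_square_laminae; infer_instance

-- ===== CLAIM (what is proved, stated in full; the proofs are below) =====
def Claim_equal_hollow_square_laminae : Prop := ∀ (n : Int), Dom_hollow_square_laminae n → Spec_hollow_square_laminae n (hollow_square_laminae n)

-- ===== LEMMAS AND PROOFS =====

-- number of even integers in [a, b): closed form
lemma pv_countEven : ∀ (k : Nat) (a b : Int), b = a + k →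
    ((PySem.List.pyRange a b 1).countP (fun x => decide (2 ∣ x)) : Int)
      = (b + 1) / 2 - (a + 1) / 2 := by
  intro k
  induction k with
  | zero =>
    intro a b hb
    rw [hb]
    simp [PySem.List.pyRange_one_eq_nil (le_refl a)]
  | succ k ih =>
    intro a b hb
    have hb' : b = (a + k) + 1 := by push_cast at hb ⊢; omega
    rw [hb', PySem.List.pyRange_one_succ_right (by omega : a ≤ a + k),
      List.countP_append, List.countP_cons, List.countP_nil]
    have hih := ih a (a + k) rfl
    by_cases h : (2:Int) ∣ (a + k)
    · simp only [h, decide_true, if_true]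
      push_cast at hih ⊢
      omega
    · simp only [h, decide_false]
      push_cast at hih ⊢
      omega

-- A's inner loop over x, for 1 ≤ y, computes exactly B's per-y closed form
lemma pv_inner (n y : Int) (hy : 1 ≤ y) (ans : Int) :
    (PySem.List.pyRange (y + 1) (PySem.Int.floordiv n y + 1) 1).foldl (fun ans x =>
      if PySem.Int.mod x 2 ≠ PySem.Int.mod y 2 then ans
      else
        let a := PySem.Int.floordiv (x + y) 2
        let b := PySem.Int.floordiv (x - y) 2
        if PySem.Int.mod a 2 ≠ PySem.Int.mod b 2 then ans
        else ans + 1) ans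
    = (if PySem.Int.mod y 2 = 0 then
        let c := PySem.Int.floordiv n (2 * y) - PySem.Int.floordiv y 2
        if c > 0 then ans + c else ans
      else ans) := by
  have h2 : (0:Int) < 2 := by norm_num
  have hy' : (0:Int) < y := by omega
  have h2y : (0:Int) < 2 * y := by omega
  -- step 1: the inner body is a 0/1 counting step for "x even and y even"
  rw [PySem.List.foldl_congr_mem _ _
      (fun a x => if (decide (x % 2 = 0) && decide (y % 2 = 0)) then a + 1 else a) ans ?_]
  · rw [PySem.List.foldl_count_if]
    set m : Int := PySem.Int.floordiv n y with hm
    have hmdef : m = n / y := by rw [hm, PySem.Int.floordiv_eq_ediv_of_pos hy']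
    have hdd : PySem.Int.floordiv n (2 * y) = m / 2 := by
      rw [PySem.Int.floordiv_eq_ediv_of_pos h2y, hmdef,
        Int.ediv_ediv_of_nonneg (le_of_lt hy'), mul_comm y 2]
    rw [PySem.Int.mod_eq_emod_of_pos h2, PySem.Int.floordiv_eq_ediv_of_pos h2, hdd]
    by_cases hye : y % 2 = 0
    · -- even y: the count is the closed form
      have hpred : (fun (x:Int) => decide (x % 2 = 0) && decide (y % 2 = 0))
          = (fun (x:Int) => decide (2 ∣ x)) := by
        funext x
        by_cases hx : (2:Int) ∣ x
        · have h1 : x % 2 = 0 := by omega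
          simp [hx, h1, hye]
        · have h1 : ¬ (x % 2 = 0) := by omega
          simp [hx, h1]
      rw [hpred, if_pos hye]
      by_cases hle : y ≤ m
      · have hcnt := pv_countEven (m - y).toNat (y + 1) (m + 1) (by omega)
        by_cases hpos : m / 2 - y / 2 > 0 <;> simp only [hpos, if_true, if_false] <;> omega
      · rw [PySem.List.pyRange_one_eq_nil (by omega : m + 1 ≤ y + 1)]
        simp only [List.countP_nil, Nat.cast_zero, add_zero]
        by_cases hpos : m / 2 - y / 2 > 0 <;> simp only [hpos, if_true, if_false]
        all_goals omega
    · -- odd y: nothing is ever counted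
      rw [if_neg hye, List.countP_eq_zero.mpr (by intro x _; simp [hye])]
      simp
  · -- pointwise: the nested parity tests equal "x even ∧ y even"
    intro a x _
    simp only [PySem.Int.mod_eq_emod_of_pos h2, PySem.Int.floordiv_eq_ediv_of_pos h2]
    by_cases hx : x % 2 = y % 2
    · by_cases hab : ((x + y) / 2) % 2 = ((x - y) / 2) % 2
      · have hev : x % 2 = 0 ∧ y % 2 = 0 := by omega
        simp [hx, hab, hev.2]
      · have hev : ¬ (x % 2 = 0 ∧ y % 2 = 0) := by omega
        simp only [ne_eq, hx, not_true_eq_false, if_false, hab, not_false_eq_true, if_true]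
        simp
        omega
    · simp [hx]
      omega

-- ===== VERDICT (by name: the statement is the Claim_ definition above) =====
theorem hollow_square_laminae_spec : Claim_equal_hollow_square_laminae := by
  intro n _
  unfold Spec_hollow_square_laminae hollow_square_laminae hollow_square_laminae_alt
  apply PySem.List.foldl_congr_mem
  intro ans y hmem
  have hy : 1 ≤ y := (PySem.List.mem_pyRange_one.mp hmem).1
  exact pv_inner n y hy ans
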